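-- pv_equiv track=rewrite | github.com/wa-kakalala/vTbgen | script/vTbgenerator.py | getClkRstName
-- ===== SOURCE A (Python) =====
-- def getClkRstName(InputList):
--     clk_name,rst_name= 'clk','rst_n'
--     clk_exist,rst_exist = 0,0
--     for in_port in InputList:
--         if "clk" in in_port or "CLK" in in_port:
--             clk_name = in_port
--             break
--
--     for in_port in InputList:
--         if "rst" in in_port or "RST" in in_port:
--             rst_name = in_port
--             break
--     return clk_name,rst_name,clk_exist,rst_exist
-- ===== SOURCE B (Python) =====
-- def getClkRstName(InputList):
--     clk_name, rst_name = 'clk', 'rst_n'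
--     clk_found, rst_found = False, False
--     for p in InputList:
--         if not clk_found and ("clk" in p or "CLK" in p):
--             clk_name = p
--             clk_found = True
--         if not rst_found and ("rst" in p or "RST" in p):
--             rst_name = p
--             rst_found = True
--         if clk_found and rst_found:
--             break
--     return clk_name, rst_name, 0, 0
-- ===== Notes on version B (the rewrite author's own statement) =====
-- stated objective: alternative
-- what changed: Replaces A's two sequential break-on-first-match scans with a single pass that tracks clk/rst assignment with two booleans and exits early once both are found.
import Mathlib
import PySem

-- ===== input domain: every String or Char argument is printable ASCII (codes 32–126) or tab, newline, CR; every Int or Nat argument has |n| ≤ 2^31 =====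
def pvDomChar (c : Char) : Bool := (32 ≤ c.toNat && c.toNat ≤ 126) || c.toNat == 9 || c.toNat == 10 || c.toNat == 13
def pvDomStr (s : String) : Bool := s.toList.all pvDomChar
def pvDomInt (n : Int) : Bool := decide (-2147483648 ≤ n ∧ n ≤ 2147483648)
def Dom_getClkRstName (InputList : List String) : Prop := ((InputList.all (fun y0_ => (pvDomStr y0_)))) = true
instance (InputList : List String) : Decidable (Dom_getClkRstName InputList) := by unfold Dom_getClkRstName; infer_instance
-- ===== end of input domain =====

-- ===== PORT A =====
-- B replaces A's two sequential break-on-first-match scans with one flagged single pass; alternative decomposition, same results.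
-- first port containing "clk"/"CLK", default "clk"  (A's first for-loop with break)
def pvFindClk : List String → String
  | [] => "clk"
  | p :: rest =>
    if PySem.Str.isIn "clk" p || PySem.Str.isIn "CLK" p then p else pvFindClk rest

-- first port containing "rst"/"RST", default "rst_n"  (A's second for-loop with break)
def pvFindRst : List String → String
  | [] => "rst_n"
  | p :: rest =>
    if PySem.Str.isIn "rst" p || PySem.Str.isIn "RST" p then p else pvFindRst rest

def getClkRstName (InputList : List String) : String × String × Int × Int :=
  (pvFindClk InputList, pvFindRst InputList, (0 : Int), (0 : Int))

-- ===== PORT B =====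
-- single pass over the ports, two found-flags, break once both are set
def pvGoB : List String → String → String → Bool → Bool → String × String × Int × Int
  | [], c, r, _, _ => (c, r, (0 : Int), (0 : Int))
  | p :: rest, c, r, cf, rf =>
    let c' := if !cf && (PySem.Str.isIn "clk" p || PySem.Str.isIn "CLK" p) then p else c
    let cf' := if !cf && (PySem.Str.isIn "clk" p || PySem.Str.isIn "CLK" p) then true else cf
    let r' := if !rf && (PySem.Str.isIn "rst" p || PySem.Str.isIn "RST" p) then p else r
    let rf' := if !rf && (PySem.Str.isIn "rst" p || PySem.Str.isIn "RST" p) then true else rf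
    if cf' && rf' then (c', r', (0 : Int), (0 : Int)) else pvGoB rest c' r' cf' rf'

def getClkRstName_alt (InputList : List String) : String × String × Int × Int :=
  pvGoB InputList "clk" "rst_n" false false

-- ===== PRECONDITION & SPEC =====
def Spec_getClkRstName (InputList : List String) (out : String × String × Int × Int) : Prop := out = getClkRstName_alt InputList
instance (InputList : List String) (out : String × String × Int × Int) : Decidable (Spec_getClkRstName InputList out) := by unfold Spec_getClkRstName; infer_instance

-- ===== CLAIM (what is proved, stated in full; the proofs are below) =====
def Claim_equal_getClkRstName : Prop := ∀ (InputList : List String), Dom_getClkRstName InputList → Spec_getClkRstName InputList (getClkRstName InputList)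

-- ===== LEMMAS AND PROOFS =====
-- generic first-match-with-default helpers used to characterise both ports
def pvFC : List String → String → String
  | [], d => d
  | p :: rest, d =>
    if PySem.Str.isIn "clk" p || PySem.Str.isIn "CLK" p then p else pvFC rest d

def pvFR : List String → String → String
  | [], d => d
  | p :: rest, d =>
    if PySem.Str.isIn "rst" p || PySem.Str.isIn "RST" p then p else pvFR rest d

theorem pvFindClk_eq (xs : List String) : pvFindClk xs = pvFC xs "clk" := by
  induction xs with
  | nil => rfl
  | cons p rest ih => simp only [pvFindClk, pvFC, ih]

theorem pvFindRst_eq (xs : List String) : pvFindRst xs = pvFR xs "rst_n" := by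
  induction xs with
  | nil => rfl
  | cons p rest ih => simp only [pvFindRst, pvFR, ih]

theorem pvGoB_eq (xs : List String) : ∀ (c r : String) (cf rf : Bool),
    pvGoB xs c r cf rf =
      ((if cf then c else pvFC xs c), (if rf then r else pvFR xs r), (0 : Int), (0 : Int)) := by
  induction xs with
  | nil => intro c r cf rf; cases cf <;> cases rf <;> simp [pvGoB, pvFC, pvFR]
  | cons p rest ih =>
    intro c r cf rf
    by_cases hcp : (PySem.Chars.isIn ['c','l','k'] p.toList = true ∨
        PySem.Chars.isIn ['C','L','K'] p.toList = true) <;>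
    by_cases hrp : (PySem.Chars.isIn ['r','s','t'] p.toList = true ∨
        PySem.Chars.isIn ['R','S','T'] p.toList = true) <;>
    cases cf <;> cases rf <;>
      simp [pvGoB, pvFC, pvFR, ih, hcp, hrp]

-- ===== VERDICT (by name: the statement is the Claim_ definition above) =====
theorem getClkRstName_spec : Claim_equal_getClkRstName := by
  intro xs _
  unfold Spec_getClkRstName getClkRstName getClkRstName_alt
  rw [pvGoB_eq, pvFindClk_eq, pvFindRst_eq]
  simp
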